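-- pv_equiv track=rewrite | github.com/Only-bottle/django-rest-framework-study | test.py | solution
-- ===== SOURCE A (Python) =====
-- from collections import Counter
--
-- def solution(data):
--     left, right = data
--     left_c = Counter(left)
--     right_c = Counter(right)
--
--     def _get_score(items):
--         score = 0
--         for key, value in items.items():
--             if key == "!":
--                 score += value * 2
--             else:
--                 score += value * 3
--         return score
--
--     left_score = _get_score(left_c)
--     right_score = _get_score(right_c)
--
--     if left_score == right_score:
--         return "무승부"
--     elif left_score > right_score:
--         return "첫 번째"
--     elif left_score < right_score:
--         return "두 번째"
-- ===== SOURCE B (Python) =====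
-- def solution(data):
--     left, right = data
--     left_score = 3 * len(left) - left.count("!")
--     right_score = 3 * len(right) - right.count("!")
--     if left_score == right_score:
--         return "무승부"
--     elif left_score > right_score:
--         return "첫 번째"
--     else:
--         return "두 번째"
-- ===== Notes on version B (the rewrite author's own statement) =====
-- stated objective: simpler
-- what changed: Replaces the Counter frequency table and the per-key scoring loop with the closed form 3*len(s) - s.count('!') for each side.
import Mathlib
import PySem

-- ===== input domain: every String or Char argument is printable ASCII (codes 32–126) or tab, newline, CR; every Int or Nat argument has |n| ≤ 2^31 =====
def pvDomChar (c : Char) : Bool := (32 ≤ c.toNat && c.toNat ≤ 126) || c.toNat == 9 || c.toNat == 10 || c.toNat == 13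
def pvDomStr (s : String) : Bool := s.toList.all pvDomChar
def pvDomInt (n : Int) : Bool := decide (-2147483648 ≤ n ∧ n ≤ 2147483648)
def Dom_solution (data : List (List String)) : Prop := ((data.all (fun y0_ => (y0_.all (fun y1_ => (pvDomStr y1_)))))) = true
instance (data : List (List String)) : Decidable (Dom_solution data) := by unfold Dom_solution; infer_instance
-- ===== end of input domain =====

-- B computes each side's score with the closed form 3*len - count("!") instead of a Counter loop.
-- Python A raises ValueError unless data unpacks into exactly two lists; Pre_ requires length 2.

-- ===== PORT A =====
-- _get_score: loop over Counter items, "!" worth 2 per occurrence, others 3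
def pvGetScore (items : PySem.Dict String Int) : Int :=
  items.items.foldl
    (fun score kv => if kv.1 == "!" then score + kv.2 * 2 else score + kv.2 * 3) 0

def solution (data : List (List String)) : String :=
  match data with
  | [left, right] =>
      let left_c := PySem.Dict.counter left
      let right_c := PySem.Dict.counter right
      let left_score := pvGetScore left_c
      let right_score := pvGetScore right_c
      if left_score = right_score then "무승부"
      else if left_score > right_score then "첫 번째"
      else if left_score < right_score then "두 번째"
      else ""  -- unreachable: the trichotomy is exhaustive
  | _ => ""    -- unpacking raises ValueError; excluded by Pre_solution

-- ===== PORT B =====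
def pvSideScore (s : List String) : Int := 3 * (s.length : Int) - (PySem.List.count s "!" : Int)

def solution_alt (data : List (List String)) : String :=
  match data with
  | left :: tail =>
      match tail with
      | right :: more =>
          if more.isEmpty then
            let left_score := pvSideScore left
            let right_score := pvSideScore right
            if left_score = right_score then "무승부"
            else if left_score > right_score then "첫 번째"
            else "두 번째"
          else ""  -- unpacking raises ValueError; excluded by Pre_solution
      | [] => ""   -- unpacking raises ValueError; excluded by Pre_solution
  | [] => ""       -- unpacking raises ValueError; excluded by Pre_solution

-- ===== PRECONDITION & SPEC =====
-- Pre_ excludes exactly the inputs where 'left, right = data' raises ValueError (length ≠ 2).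
def Pre_solution (data : List (List String)) : Prop := data.length = 2
instance (data : List (List String)) : Decidable (Pre_solution data) := by unfold Pre_solution; infer_instance
def pvWitness_solution : List (List String) := [["a", "!"], ["bb"]]

def Spec_solution (data : List (List String)) (out : String) : Prop := out = solution_alt data
instance (data : List (List String)) (out : String) : Decidable (Spec_solution data out) := by unfold Spec_solution; infer_instance

-- ===== CLAIM (what is proved, stated in full; the proofs are below) =====
def Claim_equal_solution : Prop := ∀ (data : List (List String)), Dom_solution data → Pre_solution data → Spec_solution data (solution data)

-- ===== LEMMAS AND PROOFS =====

-- summing an indicator over a Nodup list picks out one term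
theorem sum_map_ite_self {α : Type} [DecidableEq α] (l : List α) (x : α) (c : Int)
    (hn : l.Nodup) (hx : x ∈ l) :
    (l.map (fun k => if x = k then c else 0)).sum = c := by
  induction l with
  | nil => cases hx
  | cons hd tl ih =>
    simp only [List.map_cons, List.sum_cons]
    rcases List.mem_cons.mp hx with h | h
    · subst h
      have hz : ∀ k ∈ tl, (if x = k then c else (0:Int)) = 0 := by
        intro k hk
        have : x ≠ k := fun e => (List.nodup_cons.mp hn).1 (e ▸ hk)
        simp [this]
      rw [if_pos rfl, List.sum_eq_zero (by simpa using hz)]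
      ring
    · have hne : x ≠ hd := fun e => (List.nodup_cons.mp hn).1 (e ▸ h)
      rw [if_neg hne, ih (List.nodup_cons.mp hn).2 h]
      ring

theorem sum_score_counts (xs l : List String) (hn : l.Nodup)
    (hsub : ∀ y ∈ xs, y ∈ l) :
    (l.map (fun k => if k = "!" then (xs.count k : Int) * 2 else (xs.count k : Int) * 3)).sum
      = 3 * (xs.length : Int) - (xs.count "!" : Int) := by
  induction xs with
  | nil => simp [List.sum_eq_zero]
  | cons x xs ih =>
    have hsub' : ∀ y ∈ xs, y ∈ l := fun y hy => hsub y (List.mem_cons_of_mem _ hy)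
    have hsplit : ∀ k,
        (if k = "!" then (((x :: xs).count k : Nat) : Int) * 2 else (((x :: xs).count k : Nat) : Int) * 3)
        = (if k = "!" then (xs.count k : Int) * 2 else (xs.count k : Int) * 3)
          + (if x = k then (if x = "!" then (2:Int) else 3) else 0) := by
      intro k
      have hc : (x::xs).count k = xs.count k + if x = k then 1 else 0 := by
        rw [List.count_cons]; simp only [beq_iff_eq]
      rw [hc]
      by_cases hxk : x = k
      · subst hxk
        by_cases h2 : x = "!" <;> simp [h2] <;> omega
      · simp [hxk]
    calc (l.map _).sum
        = (l.map (fun k => (if k = "!" then (xs.count k : Int) * 2 else (xs.count k : Int) * 3)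
            + (if x = k then (if x = "!" then (2:Int) else 3) else 0))).sum := by
          exact congrArg _ (List.map_congr_left (fun k _ => hsplit k))
      _ = (l.map (fun k => if k = "!" then (xs.count k : Int) * 2 else (xs.count k : Int) * 3)).sum
            + (l.map (fun k => if x = k then (if x = "!" then (2:Int) else 3) else 0)).sum := by
          rw [← List.sum_map_add]
      _ = (3 * (xs.length : Int) - (xs.count "!" : Int)) + (if x = "!" then (2:Int) else 3) := by
          rw [ih hsub', sum_map_ite_self l x _ hn (hsub x (List.mem_cons_self))]
      _ = 3 * (((x :: xs).length : Nat) : Int) - (((x :: xs).count "!" : Nat) : Int) := by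
          have hc : (x::xs).count "!" = xs.count "!" + if x = "!" then 1 else 0 := by
            rw [List.count_cons]; simp only [beq_iff_eq]
          rw [hc, List.length_cons]
          by_cases h2 : x = "!" <;> simp [h2] <;> omega

theorem score_counter (xs : List String) :
    pvGetScore (PySem.Dict.counter xs) = 3 * (xs.length : Int) - (xs.count "!" : Int) := by
  unfold pvGetScore
  rw [PySem.Dict.items_counter]
  rw [PySem.List.foldl_congr_mem
    ((PySem.Set.ofList xs).map (fun k => (k, (xs.count k : Int)))) _
    (fun (score : Int) (kv : String × Int) => score + (if kv.1 == "!" then kv.2 * 2 else kv.2 * 3)) 0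
    (fun acc kv _ => by by_cases h : kv.1 == "!" <;> simp [h])]
  rw [PySem.List.foldl_add]
  rw [List.map_map]
  have he : ((PySem.Set.ofList xs : List String).map
      ((fun kv : String × Int => if kv.1 == "!" then kv.2 * 2 else kv.2 * 3) ∘
        fun k => (k, (xs.count k : Int))))
      = (PySem.Set.ofList xs : List String).map
        (fun k => if k = "!" then (xs.count k : Int) * 2 else (xs.count k : Int) * 3) := by
    refine List.map_congr_left (fun k _ => ?_)
    simp only [Function.comp, beq_iff_eq]
  rw [he, sum_score_counts xs _ (PySem.Set.nodup_ofList xs)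
    (fun y hy => (PySem.Set.mem_ofList xs y).mpr hy)]
  ring

theorem side_eq (xs : List String) :
    pvGetScore (PySem.Dict.counter xs) = pvSideScore xs := by
  rw [score_counter, pvSideScore, PySem.List.count_eq]

-- ===== VERDICT (by name: the statement is the Claim_ definition above) =====
theorem solution_spec : Claim_equal_solution := by
  intro data _ hpre
  match data, hpre with
  | [left, right], _ =>
    show solution [left, right] = solution_alt [left, right]
    simp only [solution, solution_alt, side_eq, List.isEmpty_nil, if_true]
    by_cases h1 : pvSideScore left = pvSideScore right
    · simp [h1]
    · by_cases h2 : pvSideScore left > pvSideScore right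
      · simp [h1, h2]
      · have h3 : pvSideScore left < pvSideScore right := by omega
        simp [h1, h2, h3]
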